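-- pv_equiv track=rewrite | github.com/Tosha1409/Codilitychallenges | Rubidium2018greedy.py | solution
-- ===== SOURCE A (Python) =====
-- def solution(X, Y):
--     points = list(zip(X,Y))
--     points.sort()
--     minimum=max((points[1][0]-points[0][0]),abs(points[1][1]-points[0][1]))
--     ln= len(points)
--     for n in range (0,ln-1):
--         m=n+1
--         while (m<ln) and (points[m][0]-points[n][0]<minimum):
--             cy=abs(points[m][1]-points[n][1])
--             if cy<minimum:  minimum=max(cy,points[m][0]-points[n][0])
--             if minimum <2 : return (0)
--             m +=1
--     return (minimum//2)
-- ===== SOURCE B (Python) =====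
-- def solution(X, Y):
--     points = list(zip(X, Y))
--     best = None
--     for i, (x1, y1) in enumerate(points):
--         for x2, y2 in points[i + 1:]:
--             d = max(abs(x2 - x1), abs(y2 - y1))
--             if best is None or d < best:
--                 best = d
--     return best // 2
-- ===== Notes on version B (the rewrite author's own statement) =====
-- stated objective: simpler
-- what changed: replaced the sort plus pruned sliding-window sweep with early-exit returns by a plain two-loop minimum of the Chebyshev distance over all pairs, halved at the end
import Mathlib
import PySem

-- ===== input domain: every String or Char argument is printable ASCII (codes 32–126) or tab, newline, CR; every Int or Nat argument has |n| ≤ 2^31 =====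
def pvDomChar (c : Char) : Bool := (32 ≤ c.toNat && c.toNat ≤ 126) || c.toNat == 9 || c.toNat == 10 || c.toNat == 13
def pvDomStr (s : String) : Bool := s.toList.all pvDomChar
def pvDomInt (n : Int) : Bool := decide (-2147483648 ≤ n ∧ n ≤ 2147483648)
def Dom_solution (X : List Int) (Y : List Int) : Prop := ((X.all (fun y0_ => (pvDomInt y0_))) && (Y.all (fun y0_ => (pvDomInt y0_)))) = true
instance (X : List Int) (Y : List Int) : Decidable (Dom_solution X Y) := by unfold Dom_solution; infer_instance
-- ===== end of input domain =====

-- B replaces A's sort + pruned sliding-window sweep (with early-exit returns) by a plain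
-- all-pairs minimum of the Chebyshev distance, halved at the end (objective: simpler; not faster).

-- ===== PORT A =====
-- inner 'while' of A: scans m upward while points[m].x - points[n].x < minimum; 'none' = the early
-- 'return 0'. fuel = ln - m bounds the remaining iterations (structural recursion, exact: when fuel
-- runs out, m ≥ ln, and the Python while-condition is false too)
def pvWhileA (pts : List (Int × Int)) (pn : Int × Int) (ln : Nat) :
    Nat → Nat → Int → Option Int
  | 0, _, minimum => some minimum
  | fuel + 1, m, minimum =>
    if m < ln ∧ (pts.getD m (0, 0)).1 - pn.1 < minimum then
      let cy := |(pts.getD m (0, 0)).2 - pn.2|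
      let minimum' := if cy < minimum then max cy ((pts.getD m (0, 0)).1 - pn.1) else minimum
      if minimum' < 2 then none else pvWhileA pts pn ln fuel (m + 1) minimum'
    else some minimum

-- outer 'for n in range(0, ln-1)' of A; fuel = (ln-1) - n, same exactness
def pvForA (pts : List (Int × Int)) (ln : Nat) : Nat → Nat → Int → Option Int
  | 0, _, minimum => some minimum
  | fuel + 1, n, minimum =>
    if n < ln - 1 then
      match pvWhileA pts (pts.getD n (0, 0)) ln (ln - (n + 1)) (n + 1) minimum with
      | none => none
      | some minimum' => pvForA pts ln fuel (n + 1) minimum'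
    else some minimum

def solution (X : List Int) (Y : List Int) : Int :=
  let points := PySem.List.sorted2 (X.zip Y) (fun p => p.1) (fun p => p.2)
  -- points[0] / points[1]: IndexError when fewer than 2 points — excluded by Pre_solution
  let p0 := points.getD 0 (0, 0)
  let p1 := points.getD 1 (0, 0)
  let minimum := max (p1.1 - p0.1) |p1.2 - p0.2|
  match pvForA points points.length (points.length - 1) 0 minimum with
  | none => 0
  | some v => PySem.Int.floordiv v 2

-- ===== PORT B =====
-- inner 'for x2, y2 in points[i+1:]' of B: running Option-minimum of the pair distances
def pvBestRow (p : Int × Int) (rest : List (Int × Int)) (best : Option Int) : Option Int :=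
  rest.foldl
    (fun b q =>
      let d := max |q.1 - p.1| |q.2 - p.2|
      match b with
      | none => some d
      | some v => some (if d < v then d else v))
    best

-- outer 'for i, (x1, y1) in enumerate(points)': each point paired with the points after it
def pvBestAll : List (Int × Int) → Option Int → Option Int
  | [], best => best
  | p :: rest, best => pvBestAll rest (pvBestRow p rest best)

def solution_alt (X : List Int) (Y : List Int) : Int :=
  match pvBestAll (X.zip Y) none with
  | some best => PySem.Int.floordiv best 2
  | none => 0   -- Python: best is None → TypeError; excluded by Pre_solution

-- ===== PRECONDITION & SPEC =====
-- Pre_ excludes inputs with fewer than two zipped points, on which A raises IndexError (points[1]).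
def Pre_solution (X : List Int) (Y : List Int) : Prop := 2 ≤ X.length ∧ 2 ≤ Y.length
instance (X : List Int) (Y : List Int) : Decidable (Pre_solution X Y) := by unfold Pre_solution; infer_instance
def pvWitness_solution : List Int × List Int := ([0, 7, 3], [5, 0, 9])

def Spec_solution (X : List Int) (Y : List Int) (out : Int) : Prop := out = solution_alt X Y
instance (X : List Int) (Y : List Int) (out : Int) : Decidable (Spec_solution X Y out) := by unfold Spec_solution; infer_instance

-- ===== CLAIM (what is proved, stated in full; the proofs are below) =====
def Claim_equal_solution : Prop := ∀ (X : List Int) (Y : List Int), Dom_solution X Y → Pre_solution X Y → Spec_solution X Y (solution X Y)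

-- ===== LEMMAS AND PROOFS =====

-- the symmetric Chebyshev distance of two points
def pvG (p q : Int × Int) : Int := max |q.1 - p.1| |q.2 - p.2|

-- multiset of distances of all unordered pairs of a list
def pvPairs : List (Int × Int) → Multiset Int
  | [] => 0
  | p :: rest => (rest.map (pvG p) : Multiset Int) + pvPairs rest

lemma pvG_comm (p q : Int × Int) : pvG p q = pvG q p := by
  simp [pvG, abs_sub_comm]

lemma pvPairs_perm {l l' : List (Int × Int)} (h : l.Perm l') : pvPairs l = pvPairs l' := by
  induction h with
  | nil => rfl
  | cons x h ih =>
      simp only [pvPairs, ih, Multiset.coe_eq_coe.mpr (h.map (pvG x))]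
  | swap x y l =>
      simp only [pvPairs, List.map_cons, ← Multiset.cons_coe, ← Multiset.singleton_add, pvG_comm x y]
      abel
  | trans _ _ ih₁ ih₂ => rw [ih₁, ih₂]

lemma mfold_coe (l : List Int) (b : Int) : (l : Multiset Int).fold min b = l.foldl min b := by
  rw [Multiset.fold_eq_foldl]; simp

-- a fold of min is insensitive to which member of the multiset seeds it
lemma mfold_min_eq (s : Multiset Int) (a b : Int) (ha : a ∈ s) (hb : b ∈ s) :
    s.fold min a = s.fold min b := by
  induction s using Quotient.inductionOn with
  | _ l =>
  show (l : Multiset Int).fold min a = (l : Multiset Int).fold min b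
  rw [mfold_coe, mfold_coe]
  have hal : a ∈ l := by simpa using ha
  have hbl : b ∈ l := by simpa using hb
  have h1 : l.foldl min a ≤ l.foldl min b := by
    rcases PySem.List.foldl_min_mem l b with h | h
    · rw [h]; exact (PySem.List.foldl_min_le l a).2 b hbl
    · exact (PySem.List.foldl_min_le l a).2 _ h
  have h2 : l.foldl min b ≤ l.foldl min a := by
    rcases PySem.List.foldl_min_mem l a with h | h
    · rw [h]; exact (PySem.List.foldl_min_le l b).2 a hal
    · exact (PySem.List.foldl_min_le l b).2 _ h
  omega

lemma mfold_min_add (x : Int) (m1 m2 : Multiset Int) :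
    Multiset.fold min x (m1 + m2) = Multiset.fold min (Multiset.fold min x m1) m2 := by
  induction m1 using Multiset.induction generalizing x with
  | empty => simp
  | cons a s ih =>
      rw [Multiset.cons_add, Multiset.fold_cons_left, ih, Multiset.fold_cons_left,
        ← Multiset.fold_cons'_left, Multiset.fold_cons_left]

lemma foldl_min_of_le (l : List Int) (c : Int) (h : ∀ a ∈ l, c ≤ a) : l.foldl min c = c := by
  induction l with
  | nil => rfl
  | cons x t ih =>
      have : min c x = c := min_eq_left (h x (by simp))
      simp only [List.foldl_cons, this]
      exact ih fun a ha => h a (by simp [ha])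

-- A-side spec value: fold min over the remaining pairs, seeded with the running minimum
def pvPairMin : List (Int × Int) → Int → Int
  | [], cur => cur
  | p :: rest, cur => pvPairMin rest ((rest.map (fun q => max (q.1 - p.1) |q.2 - p.2|)).foldl min cur)

lemma pvPairMin_le (l : List (Int × Int)) (cur : Int) : pvPairMin l cur ≤ cur := by
  induction l generalizing cur with
  | nil => simp [pvPairMin]
  | cons p rest ih =>
      exact le_trans (ih _) (PySem.List.foldl_min_le _ cur).1

lemma pvPairMin_nonneg (l : List (Int × Int)) (cur : Int) (h : 0 ≤ cur) : 0 ≤ pvPairMin l cur := by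
  induction l generalizing cur with
  | nil => simpa [pvPairMin]
  | cons p rest ih =>
      refine ih _ ?_
      rcases PySem.List.foldl_min_mem (rest.map (fun q => max (q.1 - p.1) |q.2 - p.2|)) cur with hm | hm
      · rw [hm]; exact h
      · obtain ⟨q, _, hq⟩ := List.mem_map.mp hm
        rw [← hq]
        exact le_trans (abs_nonneg (q.2 - p.2)) (le_max_right _ _)

-- on a list sorted by x, pvPairMin is the multiset fold over all pair distances
lemma pvPairMin_eq_fold (l : List (Int × Int)) (hs : l.Pairwise (fun a b => a.1 ≤ b.1)) (cur : Int) :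
    pvPairMin l cur = (pvPairs l).fold min cur := by
  induction l generalizing cur with
  | nil => rfl
  | cons p rest ih =>
      have hhead : ∀ q ∈ rest, p.1 ≤ q.1 := fun q hq => (List.pairwise_cons.mp hs).1 q hq
      have htail := (List.pairwise_cons.mp hs).2
      have hmap : rest.map (fun q => max (q.1 - p.1) |q.2 - p.2|) = rest.map (pvG p) := by
        refine List.map_congr_left fun q hq => ?_
        have h1 : |q.1 - p.1| = q.1 - p.1 := abs_of_nonneg (by have := hhead q hq; omega)
        simp [pvG, h1]
      show pvPairMin rest _ = Multiset.fold min cur (_ + pvPairs rest)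
      rw [ih htail, hmap, mfold_min_add, mfold_coe]

-- sortedness of sorted2 in the first component, via the insertion-sort invariant
def pvLex (a b : Int × Int) : Bool := decide (a.1 < b.1) || (!decide (b.1 < a.1) && decide (a.2 < b.2))

lemma pvLex_iff (a b : Int × Int) : pvLex a b = true ↔ (a.1 < b.1 ∨ (¬ b.1 < a.1 ∧ a.2 < b.2)) := by
  simp [pvLex]

lemma pvLex_asymm {a b : Int × Int} (h : pvLex a b = true) : pvLex b a = false := by
  have h1 := (pvLex_iff a b).mp h
  rw [Bool.eq_false_iff]
  intro hc
  have h2 := (pvLex_iff b a).mp hc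
  omega

lemma pvLex_trans_not {x y z : Int × Int} (h1 : pvLex x y = true) (h2 : pvLex z y = false) :
    pvLex z x = false := by
  have h1' := (pvLex_iff x y).mp h1
  have h2' : ¬ (z.1 < y.1 ∨ (¬ y.1 < z.1 ∧ z.2 < y.2)) := by
    rw [← pvLex_iff]; simp [h2]
  rw [Bool.eq_false_iff]
  intro hc
  have h3 := (pvLex_iff z x).mp hc
  omega

lemma insertBy_pvLex_pairwise (x : Int × Int) (ys : List (Int × Int))
    (h : ys.Pairwise (fun a b => pvLex b a = false)) :
    (PySem.List.insertBy pvLex x ys).Pairwise (fun a b => pvLex b a = false) := by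
  induction ys with
  | nil => simp [PySem.List.insertBy]
  | cons y t ih =>
      rw [List.pairwise_cons] at h
      by_cases hb : pvLex x y = true
      · rw [show PySem.List.insertBy pvLex x (y :: t) = x :: y :: t by simp [PySem.List.insertBy, hb]]
        refine List.pairwise_cons.mpr ⟨?_, List.pairwise_cons.mpr h⟩
        intro z hz
        rcases List.mem_cons.mp hz with rfl | hzt
        · exact pvLex_asymm hb
        · exact pvLex_trans_not hb (h.1 z hzt)
      · rw [show PySem.List.insertBy pvLex x (y :: t) = y :: PySem.List.insertBy pvLex x t by
          simp [PySem.List.insertBy, hb]]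
        refine List.pairwise_cons.mpr ⟨?_, ih h.2⟩
        intro z hz
        rcases (PySem.List.mem_insertBy pvLex x z t).mp hz with rfl | hzt
        · exact Bool.eq_false_iff.mpr hb
        · exact h.1 z hzt

lemma foldl_insertBy_pairwise (xs : List (Int × Int)) (acc : List (Int × Int))
    (h : acc.Pairwise (fun a b => pvLex b a = false)) :
    (xs.foldl (fun acc x => PySem.List.insertBy pvLex x acc) acc).Pairwise
      (fun a b => pvLex b a = false) := by
  induction xs generalizing acc with
  | nil => exact h
  | cons x t ih => exact ih _ (insertBy_pvLex_pairwise x acc h)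

lemma sorted2_pairwise_fst (xs : List (Int × Int)) :
    (PySem.List.sorted2 xs (fun p => p.1) (fun p => p.2)).Pairwise (fun a b => a.1 ≤ b.1) := by
  have h : PySem.List.sorted2 xs (fun p => p.1) (fun p => p.2)
      = xs.foldl (fun acc x => PySem.List.insertBy pvLex x acc) [] := rfl
  rw [h]
  refine (foldl_insertBy_pairwise xs [] (by simp)).imp ?_
  intro a b hab
  simp only [pvLex, Bool.or_eq_false_iff, Bool.and_eq_false_iff, decide_eq_false_iff_not] at hab
  omega

-- inner while loop: characterisation ('none' = early return, only when the window minimum is < 2;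
-- 'some v' = the fold of min over the whole window, skipped pairs being no smaller)
lemma pvWhileA_spec (pts : List (Int × Int)) (hs : pts.Pairwise (fun a b => a.1 ≤ b.1))
    (pn : Int × Int) (k m : Nat) (cur : Int) (hk : pts.length - m = k) :
    (pvWhileA pts pn pts.length k m cur = none →
      ((pts.drop m).map (fun q => max (q.1 - pn.1) |q.2 - pn.2|)).foldl min cur < 2) ∧
    (∀ v, pvWhileA pts pn pts.length k m cur = some v →
      v = ((pts.drop m).map (fun q => max (q.1 - pn.1) |q.2 - pn.2|)).foldl min cur) := by
  induction k generalizing m cur with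
  | zero =>
      have hm : pts.length ≤ m := by omega
      rw [List.drop_eq_nil_of_le hm]
      simp [pvWhileA]
  | succ k ih =>
      have hm : m < pts.length := by omega
      have hget : pts.getD m (0, 0) = pts[m] := List.getD_eq_getElem pts (0, 0) hm
      have hdrop : pts.drop m = pts[m] :: pts.drop (m + 1) := List.drop_eq_getElem_cons hm
      have hhead : ∀ q ∈ pts.drop (m + 1), pts[m].1 ≤ q.1 := by
        have hsub : (pts.drop m).Pairwise (fun a b => a.1 ≤ b.1) :=
          hs.sublist (List.drop_sublist m pts)
        rw [hdrop] at hsub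
        exact fun q hq => (List.pairwise_cons.mp hsub).1 q hq
      by_cases hc : m < pts.length ∧ (pts.getD m (0, 0)).1 - pn.1 < cur
      · have hdx : pts[m].1 - pn.1 < cur := by rw [← hget]; exact hc.2
        have hstep : pvWhileA pts pn pts.length (k + 1) m cur =
            if (if |(pts.getD m (0, 0)).2 - pn.2| < cur
                then max |(pts.getD m (0, 0)).2 - pn.2| ((pts.getD m (0, 0)).1 - pn.1) else cur) < 2
            then none
            else pvWhileA pts pn pts.length k (m + 1)
              (if |(pts.getD m (0, 0)).2 - pn.2| < cur
               then max |(pts.getD m (0, 0)).2 - pn.2| ((pts.getD m (0, 0)).1 - pn.1) else cur) := by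
          rw [pvWhileA, if_pos hc]
        rw [hstep, hget]
        -- r = fold over the window, with its head folded into the seed
        have hr : ((pts.drop m).map (fun q => max (q.1 - pn.1) |q.2 - pn.2|)).foldl min cur
            = ((pts.drop (m + 1)).map (fun q => max (q.1 - pn.1) |q.2 - pn.2|)).foldl min
                (min cur (max (pts[m].1 - pn.1) |pts[m].2 - pn.2|)) := by
          rw [hdrop, List.map_cons, List.foldl_cons]
        have hseed : min cur (max (pts[m].1 - pn.1) |pts[m].2 - pn.2|)
            = (if |pts[m].2 - pn.2| < cur
               then max |pts[m].2 - pn.2| (pts[m].1 - pn.1) else cur) := by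
          by_cases hcy : |pts[m].2 - pn.2| < cur
          · rw [if_pos hcy, max_comm]
            exact min_eq_right (le_of_lt (max_lt hcy hdx))
          · rw [if_neg hcy]
            exact min_eq_left (le_trans (not_lt.mp hcy) (le_max_right _ _))
        rw [hr, hseed]
        set cur' := (if |pts[m].2 - pn.2| < cur
               then max |pts[m].2 - pn.2| (pts[m].1 - pn.1) else cur) with hcur'
        by_cases h2 : cur' < 2
        · rw [if_pos h2]
          refine ⟨fun _ => ?_, fun v hv => by simp at hv⟩
          exact lt_of_le_of_lt (PySem.List.foldl_min_le _ cur').1 h2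
        · rw [if_neg h2]
          exact ih (m + 1) cur' (by omega)
      · have hdx : cur ≤ pts[m].1 - pn.1 := by
          rcases not_and_or.mp hc with h | h
          · omega
          · rw [← hget]; omega
        rw [pvWhileA, if_neg hc]
        have hall : ∀ a ∈ (pts.drop m).map (fun q => max (q.1 - pn.1) |q.2 - pn.2|), cur ≤ a := by
          intro a ha
          obtain ⟨q, hq, rfl⟩ := List.mem_map.mp ha
          have hq1 : pts[m].1 ≤ q.1 := by
            rw [hdrop] at hq
            rcases List.mem_cons.mp hq with rfl | hq'
            · exact le_refl _
            · exact hhead _ hq'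
          exact le_trans (by omega) (le_max_left (q.1 - pn.1) |q.2 - pn.2|)
        rw [foldl_min_of_le _ _ hall]
        exact ⟨fun h => by simp at h, fun v hv => by injection hv; omega⟩

-- outer for loop: characterisation
lemma pvForA_spec (pts : List (Int × Int)) (hs : pts.Pairwise (fun a b => a.1 ≤ b.1))
    (k n : Nat) (cur : Int) (hk : pts.length - 1 - n = k) :
    (pvForA pts pts.length k n cur = none → pvPairMin (pts.drop n) cur < 2) ∧
    (∀ v, pvForA pts pts.length k n cur = some v → v = pvPairMin (pts.drop n) cur) := by
  induction k generalizing n cur with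
  | zero =>
      rw [pvForA]
      have : pvPairMin (pts.drop n) cur = cur := by
        have hlen : (pts.drop n).length ≤ 1 := by rw [List.length_drop]; omega
        rcases hd : pts.drop n with _ | ⟨p, t⟩
        · rfl
        · rw [hd] at hlen
          simp only [List.length_cons] at hlen
          obtain rfl : t = [] := List.eq_nil_of_length_eq_zero (by omega)
          rfl
      rw [this]
      exact ⟨fun h => by simp at h, fun v hv => by injection hv; omega⟩
  | succ k ih =>
      have hn : n < pts.length - 1 := by omega
      have hnl : n < pts.length := by omega
      have hget : pts.getD n (0, 0) = pts[n] := List.getD_eq_getElem pts (0, 0) hnl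
      have hdrop : pts.drop n = pts[n] :: pts.drop (n + 1) := List.drop_eq_getElem_cons hnl
      have hw := pvWhileA_spec pts hs pts[n] (pts.length - (n + 1)) (n + 1) cur rfl
      have hpm : pvPairMin (pts.drop n) cur = pvPairMin (pts.drop (n + 1))
          (((pts.drop (n + 1)).map
            (fun q => max (q.1 - pts[n].1) |q.2 - pts[n].2|)).foldl min cur) := by
        rw [hdrop]; rfl
      rw [pvForA, if_pos hn, hget]
      rcases hres : pvWhileA pts pts[n] pts.length (pts.length - (n + 1)) (n + 1) cur with _ | v
      · refine ⟨fun _ => ?_, fun w hq => by simp at hq⟩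
        rw [hpm]
        exact lt_of_le_of_lt (pvPairMin_le _ _) (hw.1 hres)
      · have hv := hw.2 v hres
        have hih := ih (n + 1) v (by omega)
        rw [hpm, ← hv]
        exact hih

-- B-side: the row fold with a some-accumulator is a plain foldl min
lemma pvBestRow_some (p : Int × Int) (rest : List (Int × Int)) (c : Int) :
    pvBestRow p rest (some c) = some ((rest.map (pvG p)).foldl min c) := by
  induction rest generalizing c with
  | nil => rfl
  | cons q t ih =>
      show pvBestRow p t (some (if max |q.1 - p.1| |q.2 - p.2| < c then max |q.1 - p.1| |q.2 - p.2| else c)) = _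
      rw [ih]
      have hmin : (if max |q.1 - p.1| |q.2 - p.2| < c then max |q.1 - p.1| |q.2 - p.2| else c)
          = min c (pvG p q) := by
        simp only [pvG]
        rcases lt_or_ge (max |q.1 - p.1| |q.2 - p.2|) c with h | h
        · rw [if_pos h, min_eq_right h.le]
        · rw [if_neg (not_lt.mpr h), min_eq_left h]
      rw [hmin]
      simp [List.map_cons]

lemma pvBestAll_some (l : List (Int × Int)) (c : Int) :
    pvBestAll l (some c) = some ((pvPairs l).fold min c) := by
  induction l generalizing c with
  | nil => rfl
  | cons p rest ih =>
      show pvBestAll rest (pvBestRow p rest (some c)) = _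
      rw [pvBestRow_some, ih]
      show some (Multiset.fold min _ (pvPairs rest)) = some (Multiset.fold min c (_ + pvPairs rest))
      rw [mfold_min_add, mfold_coe]

lemma mfold_min_le_seed (a : Int) (s : Multiset Int) : s.fold min a ≤ a := by
  induction s using Quotient.inductionOn with
  | _ l =>
      show (l : Multiset Int).fold min a ≤ a
      rw [mfold_coe]
      exact (PySem.List.foldl_min_le l a).1

lemma mfold_min_cons_self (a : Int) (s : Multiset Int) : (a ::ₘ s).fold min a = s.fold min a := by
  rw [Multiset.fold_cons_left]
  exact min_eq_right (mfold_min_le_seed a s)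

lemma pvG_head_mem (p q : Int × Int) (rest : List (Int × Int)) :
    pvG p q ∈ pvPairs (p :: q :: rest) := by
  show pvG p q ∈ (((q :: rest).map (pvG p) : List Int) : Multiset Int) + pvPairs (q :: rest)
  refine Multiset.mem_add.mpr (Or.inl ?_)
  rw [Multiset.mem_coe]
  exact List.mem_map.mpr ⟨q, List.mem_cons_self, rfl⟩

lemma pvG_nonneg (p q : Int × Int) : 0 ≤ pvG p q :=
  le_trans (abs_nonneg (q.2 - p.2)) (le_max_right _ _)

-- B's whole computation on a list of at least two points
lemma pvBestAll_char (z0 z1 : Int × Int) (zr : List (Int × Int)) :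
    pvBestAll (z0 :: z1 :: zr) none
      = some ((pvPairs (z0 :: z1 :: zr)).fold min (pvG z0 z1)) := by
  have h1 : pvBestRow z0 (z1 :: zr) none
      = some ((zr.map (pvG z0)).foldl min (pvG z0 z1)) := by
    show pvBestRow z0 zr (some (max |z1.1 - z0.1| |z1.2 - z0.2|)) = _
    rw [pvBestRow_some]
    rfl
  show pvBestAll (z1 :: zr) (pvBestRow z0 (z1 :: zr) none) = _
  rw [h1, pvBestAll_some]
  congr 1
  rw [← mfold_coe, ← mfold_min_add]
  have h2 : pvPairs (z0 :: z1 :: zr)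
      = pvG z0 z1 ::ₘ ((zr.map (pvG z0) : List Int) + pvPairs (z1 :: zr)) := by
    show (((z1 :: zr).map (pvG z0) : List Int) : Multiset Int) + pvPairs (z1 :: zr) = _
    rw [List.map_cons, ← Multiset.cons_coe, Multiset.cons_add]
  rw [h2, mfold_min_cons_self]

-- ===== VERDICT (by name: the statement is the Claim_ definition above) =====
theorem solution_spec : Claim_equal_solution := by
  intro X Y _ hpre
  show solution X Y = solution_alt X Y
  obtain ⟨hx, hy⟩ := hpre
  have hzlen : 2 ≤ (X.zip Y).length := by rw [List.length_zip]; omega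
  set pts := PySem.List.sorted2 (X.zip Y) (fun p => p.1) (fun p => p.2) with hpts
  have hperm : pts.Perm (X.zip Y) := PySem.List.sorted2_perm (X.zip Y) _ _ false
  have hplen : 2 ≤ pts.length := by rw [hperm.length_eq]; exact hzlen
  have hsort : pts.Pairwise (fun a b => a.1 ≤ b.1) := sorted2_pairwise_fst (X.zip Y)
  obtain ⟨p0, p1, rest, hrep⟩ : ∃ p0 p1 rest, pts = p0 :: p1 :: rest := by
    rcases pts with _ | ⟨a, _ | ⟨b, t⟩⟩
    · simp at hplen
    · simp at hplen
    · exact ⟨a, b, t, rfl⟩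
  obtain ⟨z0, z1, zr, hzrep⟩ : ∃ z0 z1 zr, X.zip Y = z0 :: z1 :: zr := by
    rcases hz : X.zip Y with _ | ⟨a, _ | ⟨b, t⟩⟩
    · rw [hz] at hzlen; simp at hzlen
    · rw [hz] at hzlen; simp at hzlen
    · exact ⟨a, b, t, rfl⟩
  have hp01 : p0.1 ≤ p1.1 := by
    rw [hrep] at hsort
    exact (List.pairwise_cons.mp hsort).1 p1 (by simp)
  have hg0 : pts.getD 0 (0, 0) = p0 := by rw [hrep]; rfl
  have hg1 : pts.getD 1 (0, 0) = p1 := by rw [hrep]; rfl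
  have hcur0 : max ((pts.getD 1 (0, 0)).1 - (pts.getD 0 (0, 0)).1)
      |(pts.getD 1 (0, 0)).2 - (pts.getD 0 (0, 0)).2| = pvG p0 p1 := by
    rw [hg0, hg1, pvG, abs_of_nonneg (by omega : (0 : Int) ≤ p1.1 - p0.1)]
  have hsol : solution X Y = (match pvForA pts pts.length (pts.length - 1) 0 (pvG p0 p1) with
      | none => 0
      | some v => PySem.Int.floordiv v 2) := by
    show (match pvForA pts pts.length (pts.length - 1) 0
        (max ((pts.getD 1 (0, 0)).1 - (pts.getD 0 (0, 0)).1)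
          |(pts.getD 1 (0, 0)).2 - (pts.getD 0 (0, 0)).2|) with
      | none => 0
      | some v => PySem.Int.floordiv v 2) = _
    rw [hcur0]
  -- both sides reduce to a fold of min over the multiset of all pair distances of zip(X, Y)
  have hA : pvPairMin pts (pvG p0 p1) = (pvPairs (X.zip Y)).fold min (pvG p0 p1) := by
    rw [pvPairMin_eq_fold pts hsort, pvPairs_perm hperm]
  have hm1 : pvG p0 p1 ∈ pvPairs (X.zip Y) := by
    rw [← pvPairs_perm hperm, hrep]
    exact pvG_head_mem p0 p1 rest
  have hm2 : pvG z0 z1 ∈ pvPairs (X.zip Y) := by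
    rw [hzrep]
    exact pvG_head_mem z0 z1 zr
  have hseed : (pvPairs (X.zip Y)).fold min (pvG p0 p1)
      = (pvPairs (X.zip Y)).fold min (pvG z0 z1) :=
    mfold_min_eq _ _ _ hm1 hm2
  have hB : solution_alt X Y
      = PySem.Int.floordiv ((pvPairs (X.zip Y)).fold min (pvG z0 z1)) 2 := by
    show (match pvBestAll (X.zip Y) none with
      | some best => PySem.Int.floordiv best 2
      | none => 0) = _
    rw [hzrep, pvBestAll_char, ← hzrep]
  have hforA := pvForA_spec pts hsort (pts.length - 1) 0 (pvG p0 p1) rfl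
  rw [List.drop_zero] at hforA
  rcases hres : pvForA pts pts.length (pts.length - 1) 0 (pvG p0 p1) with _ | v
  · -- A returned 0 early: the overall minimum is 0 or 1, so B's best // 2 is 0 as well
    have hlt : pvPairMin pts (pvG p0 p1) < 2 := hforA.1 hres
    have hge : 0 ≤ pvPairMin pts (pvG p0 p1) :=
      pvPairMin_nonneg pts (pvG p0 p1) (pvG_nonneg p0 p1)
    rw [hsol, hres, hB, ← hseed, ← hA]
    have h02 : PySem.Int.floordiv (pvPairMin pts (pvG p0 p1)) 2 = 0 := by
      rw [PySem.Int.floordiv_eq_iff_of_pos (by omega)]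
      omega
    rw [h02]
  · have hv : v = pvPairMin pts (pvG p0 p1) := hforA.2 v hres
    rw [hsol, hres, hB, ← hseed, ← hA, hv]
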